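-- pv_equiv track=rewrite | github.com/ThomasTrepanier/log6307-final-project | data/pyscent/stackoverflow/code-dump/14610_77.py | consecutive
-- ===== SOURCE A (Python) =====
-- L = [1,2,3,4,1,1,1,2,3,4]
--
-- n = 3
--
-- def consecutive (L,n):
--     c = 0
--     for i in L:
--         if i == 1:
--             c += 1
--         else:
--             c = 0
--         if c >= n:
--             return True
--     return False
-- ===== SOURCE B (Python) =====
-- def consecutive(L, n):
--     # L is non-empty and some length-n window of L is all ones
--     return bool(L) and any(all(x == 1 for x in L[i:i + n])
--                            for i in range(len(L) - n + 1))
-- ===== Notes on version B (the rewrite author's own statement) =====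
-- stated objective: alternative
-- what changed: Replaces the incrementally-reset running counter with a brute-force sliding-window check: the list is non-empty and some slice L[i:i+n] consists entirely of ones.
import Mathlib
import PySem

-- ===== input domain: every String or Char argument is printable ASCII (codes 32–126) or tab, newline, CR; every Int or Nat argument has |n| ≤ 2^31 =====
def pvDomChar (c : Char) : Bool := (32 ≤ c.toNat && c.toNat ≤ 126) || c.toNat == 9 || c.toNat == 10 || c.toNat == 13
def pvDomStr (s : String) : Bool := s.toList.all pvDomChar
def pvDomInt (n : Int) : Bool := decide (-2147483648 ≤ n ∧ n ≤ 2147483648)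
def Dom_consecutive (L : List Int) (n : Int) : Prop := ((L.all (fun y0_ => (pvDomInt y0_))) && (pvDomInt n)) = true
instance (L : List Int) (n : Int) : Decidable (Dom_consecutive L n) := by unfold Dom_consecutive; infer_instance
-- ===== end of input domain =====

-- B replaces A's running counter with a brute-force sliding-window check (alternative decomposition, not faster).

-- ===== PORT A =====
-- the for-loop with the running counter c and early 'return True'
def consecutiveGo (n : Int) : List Int → Int → Bool
  | [], _ => false
  | i :: rest, c =>
    let c' := if i == 1 then c + 1 else 0
    if n ≤ c' then true else consecutiveGo n rest c'

def consecutive (L : List Int) (n : Int) : Bool := consecutiveGo n L 0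

-- ===== PORT B =====
-- bool(L) and any(all(x == 1 for x in L[i:i+n]) for i in range(len(L) - n + 1))
def consecutive_alt (L : List Int) (n : Int) : Bool :=
  !L.isEmpty &&
    (PySem.List.pyRange 0 ((L.length : Int) - n + 1) 1).any (fun i =>
      (PySem.List.slice L (some i) (some (i + n))).all (fun x => x == 1))

-- ===== PRECONDITION & SPEC =====
def Spec_consecutive (L : List Int) (n : Int) (out : Bool) : Prop := out = consecutive_alt L n
instance (L : List Int) (n : Int) (out : Bool) : Decidable (Spec_consecutive L n out) := by unfold Spec_consecutive; infer_instance

-- ===== CLAIM (what is proved, stated in full; the proofs are below) =====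
def Claim_equal_consecutive : Prop := ∀ (L : List Int) (n : Int), Dom_consecutive L n → Spec_consecutive L n (consecutive L n)

-- ===== LEMMAS AND PROOFS =====

-- 'window of k ones at position i'
def OnesAt (M : List Int) (i k : ℕ) : Prop := ∀ j < k, M[i + j]? = some (1 : Int)

theorem consecutiveGo_iff (n : Int) (hn : 1 ≤ n) :
    ∀ (L : List Int) (c : Int), 0 ≤ c →
      (consecutiveGo n L c = true ↔
        ∃ i : ℕ, i + n.toNat ≤ c.toNat + L.length ∧ c.toNat < i + n.toNat ∧
          OnesAt (List.replicate c.toNat (1 : Int) ++ L) i n.toNat) := by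
  intro L
  induction L with
  | nil =>
    intro c _
    simp only [consecutiveGo, List.length_nil]
    constructor
    · intro h; exact absurd h (by simp)
    · rintro ⟨i, h1, h2, -⟩; omega
  | cons x r ih =>
    intro c hc
    by_cases hx : x = 1
    · subst hx
      have hM : List.replicate c.toNat (1 : Int) ++ 1 :: r
          = List.replicate (c.toNat + 1) (1 : Int) ++ r := by
        rw [List.replicate_succ', List.append_assoc, List.singleton_append]
      have hc1 : (c + 1).toNat = c.toNat + 1 := by omega
      simp only [consecutiveGo, beq_self_eq_true, if_true, hM]
      by_cases hle : n ≤ c + 1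
      · rw [if_pos hle]
        simp only [true_iff]
        refine ⟨c.toNat + 1 - n.toNat, ?_, ?_, ?_⟩
        · simp only [List.length_cons]; omega
        · omega
        intro j hj
        rw [List.getElem?_append_left (by simp only [List.length_replicate]; omega), List.getElem?_replicate]
        simp; omega
      · rw [if_neg hle]
        rw [ih (c + 1) (by omega)]
        simp only [hc1, List.length_cons]
        constructor
        · rintro ⟨i, h1, h2, hW⟩; exact ⟨i, by omega, by omega, hW⟩
        · rintro ⟨i, h1, h2, hW⟩; exact ⟨i, by omega, by omega, hW⟩
    · have hx' : (x == 1) = false := by simpa using hx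
      simp only [consecutiveGo, hx', Bool.false_eq_true, if_false]
      have h0 : ¬ (n ≤ (0 : Int)) := by omega
      rw [if_neg h0]
      rw [ih 0 le_rfl]
      simp only [Int.toNat_zero, List.replicate_zero, List.nil_append, List.length_cons]
      constructor
      · rintro ⟨i, h1, h2, hW⟩
        refine ⟨c.toNat + 1 + i, by omega, by omega, ?_⟩
        intro j hj
        rw [List.getElem?_append_right (by simp only [List.length_replicate]; omega)]
        simp only [List.length_replicate]
        rw [show c.toNat + 1 + i + j - c.toNat = (i + j) + 1 by omega,
          List.getElem?_cons_succ]
        exact hW j hj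
      · rintro ⟨i, h1, h2, hW⟩
        -- the window cannot contain position c.toNat (where x ≠ 1 sits), so i ≥ c.toNat + 1
        have hi : c.toNat + 1 ≤ i := by
          by_contra hlt
          have hmem : (List.replicate c.toNat (1 : Int) ++ x :: r)[c.toNat]? = some 1 := by
            have := hW (c.toNat - i) (by omega)
            rwa [show i + (c.toNat - i) = c.toNat by omega] at this
          rw [List.getElem?_append_right (by simp)] at hmem
          simp at hmem
          exact hx hmem
        refine ⟨i - (c.toNat + 1), by omega, by omega, ?_⟩
        intro j hj
        have := hW j hj
        rw [List.getElem?_append_right (by simp only [List.length_replicate]; omega)] at this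
        simp only [List.length_replicate] at this
        rw [show i + j - c.toNat = (i - (c.toNat + 1) + j) + 1 by omega,
          List.getElem?_cons_succ] at this
        exact this

theorem slice_all_iff (L : List Int) (m k : ℕ) (h : m + k ≤ L.length) :
    (((L.drop m).take k).all (fun x => x == 1) = true ↔ OnesAt L m k) := by
  rw [List.all_eq_true]
  constructor
  · intro hall j hj
    have hget : ((L.drop m).take k)[j]? = L[m + j]? := by
      rw [List.getElem?_take_of_lt hj, List.getElem?_drop]
    have hjlen : j < ((L.drop m).take k).length := by
      simp [List.length_take, List.length_drop]; omega
    have := hall ((L.drop m).take k)[j] (List.getElem_mem hjlen)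
    rw [← hget, List.getElem?_eq_getElem hjlen]
    simpa using this
  · intro hW x hx
    obtain ⟨j, hjlen, hj⟩ := List.mem_iff_getElem.mp hx
    have hjk : j < k := by
      have := hjlen; simp [List.length_take, List.length_drop] at this; omega
    have hget : ((L.drop m).take k)[j]? = L[m + j]? := by
      rw [List.getElem?_take_of_lt hjk, List.getElem?_drop]
    have := hW j hjk
    rw [← hget, List.getElem?_eq_getElem hjlen, hj, Option.some_inj] at this
    simp [this]

theorem consecutive_alt_iff (L : List Int) (n : Int) (hn : 1 ≤ n) :
    (consecutive_alt L n = true ↔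
      ∃ i : ℕ, i + n.toNat ≤ L.length ∧ OnesAt L i n.toNat) := by
  unfold consecutive_alt
  cases L with
  | nil =>
    simp only [List.isEmpty_nil, Bool.not_true, Bool.false_and]
    constructor
    · intro h; exact absurd h (by simp)
    · rintro ⟨i, h1, -⟩; simp at h1; omega
  | cons y r =>
    simp only [List.isEmpty_cons, Bool.not_false, Bool.true_and]
    rw [List.any_eq_true]
    constructor
    · rintro ⟨a, hmem, hP⟩
      rw [PySem.List.mem_pyRange_one] at hmem
      obtain ⟨ha0, halt⟩ := hmem
      have hbound : a + n ≤ ((y :: r).length : Int) := by omega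
      rw [PySem.List.slice_toNat (y :: r) ha0 (by omega)] at hP
      have htn : (a + n).toNat - a.toNat = n.toNat := by omega
      rw [htn] at hP
      refine ⟨a.toNat, by omega, ?_⟩
      exact (slice_all_iff (y :: r) a.toNat n.toNat (by omega)).mp hP
    · rintro ⟨i, h1, hW⟩
      refine ⟨(i : Int), ?_, ?_⟩
      · rw [PySem.List.mem_pyRange_one]
        constructor
        · exact Int.natCast_nonneg i
        · omega
      · rw [PySem.List.slice_toNat (y :: r) (Int.natCast_nonneg i) (by omega)]
        have htn : ((i : Int) + n).toNat - ((i : Int)).toNat = n.toNat := by omega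
        rw [htn, Int.toNat_natCast]
        exact (slice_all_iff (y :: r) i n.toNat h1).mpr hW

-- ===== VERDICT (by name: the statement is the Claim_ definition above) =====
theorem consecutive_spec : Claim_equal_consecutive := by
  intro L n _
  unfold Spec_consecutive
  by_cases hn : 1 ≤ n
  · rw [Bool.eq_iff_iff, consecutive_alt_iff L n hn]
    unfold consecutive
    rw [consecutiveGo_iff n hn L 0 le_rfl]
    simp only [Int.toNat_zero, List.replicate_zero, List.nil_append, Nat.zero_add]
    constructor
    · rintro ⟨i, h1, -, hW⟩; exact ⟨i, h1, hW⟩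
    · rintro ⟨i, h1, hW⟩; exact ⟨i, h1, by omega, hW⟩
  · -- n ≤ 0: both return (L ≠ [])
    cases L with
    | nil => simp [consecutive, consecutiveGo, consecutive_alt]
    | cons x r =>
      have hA : consecutive (x :: r) n = true := by
        unfold consecutive consecutiveGo
        by_cases hx : x == 1 <;> simp [hx] <;> omega
      rw [hA]
      unfold consecutive_alt
      simp only [List.isEmpty_cons, Bool.not_false, Bool.true_and]
      refine Eq.symm ?_
      rw [List.any_eq_true]
      refine ⟨-n, ?_, ?_⟩
      · rw [PySem.List.mem_pyRange_one]
        constructor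
        · omega
        · simp; omega
      · rw [show (-n + n : Int) = 0 by ring,
          PySem.List.slice_toNat (x :: r) (by omega) (by omega)]
        simp
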